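-- pv_equiv track=rewrite | github.com/Uday232523/WebDev-backend-T1 | q3.py | f
-- ===== SOURCE A (Python) =====
-- def f(L,s):
--     n=0
--     List=[]
--     for i in L:
-- 	    n+=1
-- 	    nL=[L[0]]                               # New list to prevent over count
-- 	    k=1
-- 	    while k<n:
-- 	        nL.append(L[k])
-- 	        k+=1
-- 	    for j in nL:
-- 		    if i+j==s:
-- 			    List.append((i,j))
--     return(List)
-- ===== SOURCE B (Python) =====
-- def f(L, s):
--     cnt = {}
--     out = []
--     for i in L:
--         cnt[i] = cnt.get(i, 0) + 1
--         out += [(i, s - i)] * cnt.get(s - i, 0)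
--     return out
-- ===== Notes on version B (the rewrite author's own statement) =====
-- stated objective: faster
-- what changed: Replaced the quadratic rebuild-the-prefix-and-scan-it loop by a single pass that keeps a running count dictionary of seen values and appends count[s-i] copies of (i, s-i) per element.
import Mathlib
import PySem

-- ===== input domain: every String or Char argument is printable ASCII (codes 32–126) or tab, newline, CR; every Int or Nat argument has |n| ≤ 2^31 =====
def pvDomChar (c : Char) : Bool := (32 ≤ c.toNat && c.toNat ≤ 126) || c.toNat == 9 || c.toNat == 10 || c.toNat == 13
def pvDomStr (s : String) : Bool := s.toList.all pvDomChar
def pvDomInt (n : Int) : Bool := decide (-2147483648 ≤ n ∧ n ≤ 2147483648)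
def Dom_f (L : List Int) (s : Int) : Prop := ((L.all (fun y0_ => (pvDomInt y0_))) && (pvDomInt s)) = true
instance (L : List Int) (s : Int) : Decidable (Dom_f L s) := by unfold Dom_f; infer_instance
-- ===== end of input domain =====

-- B replaces A's quadratic prefix-rebuild-and-scan by a single pass with a running count dictionary (asymptotically faster).

-- ===== PORT A =====
-- the 'while k<n: nL.append(L[k]); k+=1' loop (L[k] is always in range when reached; .getD 0 is never the none case)
def fWhile (L : List Int) (n k : Nat) (acc : List Int) : List Int :=
  if k < n then fWhile L n (k + 1) (acc ++ [(PySem.List.pyGet? L (k : Int)).getD 0]) else acc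
termination_by n - k

def f (L : List Int) (s : Int) : List (Int × Int) :=
  (L.foldl (fun (st : Nat × List (Int × Int)) i =>
    let n := st.1 + 1
    -- nL=[L[0]] then the while loop (L[0] exists whenever the for-loop body runs)
    let nL := fWhile L n 1 [(PySem.List.pyGet? L 0).getD 0]
    (n, nL.foldl (fun acc j => if i + j == s then acc ++ [(i, j)] else acc) st.2)) (0, [])).2

-- ===== PORT B =====
def f_alt (L : List Int) (s : Int) : List (Int × Int) :=
  (L.foldl (fun (st : PySem.Dict Int Int × List (Int × Int)) i =>
    let cnt := st.1.insert i (st.1.getD i 0 + 1)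
    (cnt, st.2 ++ PySem.List.pyRepeat [(i, s - i)] (cnt.getD (s - i) 0))) (PySem.Dict.empty, [])).2

-- ===== PRECONDITION & SPEC =====
def Spec_f (L : List Int) (s : Int) (out : List (Int × Int)) : Prop := out = f_alt L s
instance (L : List Int) (s : Int) (out : List (Int × Int)) : Decidable (Spec_f L s out) := by unfold Spec_f; infer_instance

-- ===== CLAIM (what is proved, stated in full; the proofs are below) =====
def Claim_equal_f : Prop := ∀ (L : List Int) (s : Int), Dom_f L s → Spec_f L s (f L s)

-- ===== LEMMAS AND PROOFS =====

-- common reference: per element i (with prefix P up to and including i), the result gains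
-- (P++[i]).count (s-i) copies of (i, s-i)
def pvSpec (s : Int) : List Int → List Int → List (Int × Int)
  | _, [] => []
  | P, i :: rest =>
      List.replicate ((P ++ [i]).count (s - i)) (i, s - i) ++ pvSpec s (P ++ [i]) rest

lemma filt_rep (i s : Int) : ∀ (nL : List Int),
    (nL.filter (fun j => i + j == s)).map (fun j => (i, j))
      = List.replicate (nL.count (s - i)) (i, s - i) := by
  intro nL
  induction nL with
  | nil => simp
  | cons a t ih =>
    by_cases h : i + a = s
    · have ha : a = s - i := by omega
      simp [ha, ih, List.replicate_succ]
    · have ha : ¬ (a = s - i) := by omega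
      simp [h, ha, ih]

lemma fWhile_eq (L : List Int) (n : Nat) (hn : n ≤ L.length) :
    ∀ (m k : Nat) (acc : List Int), n - k = m → k ≤ n →
      fWhile L n k acc = acc ++ (L.take n).drop k := by
  intro m
  induction m with
  | zero =>
    intro k acc hm hk
    have hkn : k = n := by omega
    rw [fWhile]
    simp [hkn]
  | succ m ih =>
    intro k acc hm hk
    have hkn : k < n := by omega
    rw [fWhile]
    simp only [hkn, if_true]
    rw [ih (k + 1) _ (by omega) (by omega)]
    have hklen : k < L.length := by omega
    have hget : (PySem.List.pyGet? L (k : Int)).getD 0 = L[k] := by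
      simp [PySem.List.pyGet?_natCast, List.getElem?_eq_getElem hklen]
    have hkt : k < (L.take n).length := by simp; omega
    rw [hget, List.append_assoc]
    congr 1
    rw [List.drop_eq_getElem_cons hkt]
    simp [List.getElem_take]

lemma take_prefix (P : List Int) (i : Int) (rest : List Int) :
    (P ++ i :: rest).take (P.length + 1) = P ++ [i] := by
  induction P with
  | nil => simp
  | cons a t ih => simp [List.take_succ_cons, ih]

lemma foldA (s : Int) (L : List Int) :
    ∀ (rest P : List Int) (acc : List (Int × Int)), P ++ rest = L →
      (rest.foldl (fun (st : Nat × List (Int × Int)) i =>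
        let n := st.1 + 1
        let nL := fWhile L n 1 [(PySem.List.pyGet? L 0).getD 0]
        (n, nL.foldl (fun acc j => if i + j == s then acc ++ [(i, j)] else acc) st.2))
        (P.length, acc)).2 = acc ++ pvSpec s P rest := by
  intro rest
  induction rest with
  | nil => intro P acc _; simp [pvSpec]
  | cons i t ih =>
    intro P acc hL
    have hlen : P.length + 1 ≤ L.length := by
      rw [← hL]; simp
    have hL0 : (PySem.List.pyGet? L 0).getD 0 = L[0]'(by omega) := by
      have : (0:Nat) < L.length := by omega
      simp [PySem.List.pyGet?_zero, List.getElem?_eq_getElem this]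
    have hNL : fWhile L (P.length + 1) 1 [(PySem.List.pyGet? L 0).getD 0] = P ++ [i] := by
      rw [fWhile_eq L (P.length + 1) hlen P.length 1 _ (by omega) (by omega), hL0]
      have htk : L.take (P.length + 1) = P ++ [i] := by rw [← hL]; exact take_prefix P i t
      have hne : (L.take (P.length + 1)).length = P.length + 1 := by simp; omega
      have hb : (0 : Nat) < (L.take (P.length + 1)).length := by omega
      have h0 : (L.take (P.length + 1))[0]'hb = L[0]'(by omega) := by
        simp [List.getElem_take]
      simp only [List.singleton_append]
      rw [← h0, ← List.drop_eq_getElem_cons hb]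
      simp [htk]
    simp only [List.foldl_cons]
    rw [hNL, PySem.List.foldl_append_if, filt_rep]
    rw [show P.length + 1 = (P ++ [i]).length by simp]
    rw [ih (P ++ [i]) _ (by rw [← hL]; simp)]
    rw [pvSpec]
    simp [List.append_assoc]

lemma counter_step (P : List Int) (i : Int) :
    (PySem.Dict.counter P).insert i ((PySem.Dict.counter P).getD i 0 + 1)
      = PySem.Dict.counter (P ++ [i]) := by
  have h1 := PySem.Dict.foldl_insert_getD_add_one_eq_counter (P ++ [i])
  have h2 := PySem.Dict.foldl_insert_getD_add_one_eq_counter P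
  rw [List.foldl_append] at h1
  simp only [List.foldl_cons, List.foldl_nil] at h1
  rw [h2] at h1
  exact h1

lemma foldB (s : Int) :
    ∀ (rest P : List Int) (acc : List (Int × Int)),
      (rest.foldl (fun (st : PySem.Dict Int Int × List (Int × Int)) i =>
        let cnt := st.1.insert i (st.1.getD i 0 + 1)
        (cnt, st.2 ++ PySem.List.pyRepeat [(i, s - i)] (cnt.getD (s - i) 0)))
        (PySem.Dict.counter P, acc)).2 = acc ++ pvSpec s P rest := by
  intro rest
  induction rest with
  | nil => intro P acc; simp [pvSpec]
  | cons i t ih =>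
    intro P acc
    simp only [List.foldl_cons]
    rw [counter_step P i]
    rw [show PySem.List.pyRepeat [(i, s - i)] ((PySem.Dict.counter (P ++ [i])).getD (s - i) 0)
        = List.replicate ((P ++ [i]).count (s - i)) (i, s - i) by
      rw [PySem.Dict.getD_counter, PySem.List.pyRepeat_singleton, Int.toNat_natCast]]
    rw [ih (P ++ [i]), pvSpec]
    simp [List.append_assoc]

-- ===== VERDICT (by name: the statement is the Claim_ definition above) =====
theorem f_spec : Claim_equal_f := by
  intro L s _
  unfold Spec_f f f_alt
  rw [show ((0 : Nat), ([] : List (Int × Int))) = (([] : List Int).length, ([] : List (Int × Int))) by simp]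
  rw [foldA s L L [] [] rfl]
  rw [show (PySem.Dict.empty : PySem.Dict Int Int) = PySem.Dict.counter [] from rfl]
  rw [foldB s L [] []]
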